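-- pv_equiv track=rewrite | github.com/facebookresearch/CompilerGym | examples/example_unrolling_service/service_py/utils.py | extract_statistics_from_ir
-- ===== SOURCE A (Python) =====
-- def extract_statistics_from_ir(ir: str):
--     stats = {"control_flow": 0, "arithmetic": 0, "memory": 0}
--     for line in ir.splitlines():
--         tokens = line.split()
--         if len(tokens) > 0:
--             opcode = tokens[0]
--             if opcode in [
--                 "br",
--                 "call",
--                 "ret",
--                 "switch",
--                 "indirectbr",
--                 "invoke",
--                 "callbr",
--                 "resume",
--                 "catchswitch",
--                 "catchret",
--                 "cleanupret",
--                 "unreachable",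
--             ]:
--                 stats["control_flow"] += 1
--             elif opcode in [
--                 "fneg",
--                 "add",
--                 "fadd",
--                 "sub",
--                 "fsub",
--                 "mul",
--                 "fmul",
--                 "udiv",
--                 "sdiv",
--                 "fdiv",
--                 "urem",
--                 "srem",
--                 "frem",
--                 "shl",
--                 "lshr",
--                 "ashr",
--                 "and",
--                 "or",
--                 "xor",
--             ]:
--                 stats["arithmetic"] += 1
--             elif opcode in [
--                 "alloca",
--                 "load",
--                 "store",
--                 "fence",
--                 "cmpxchg",
--                 "atomicrmw",
--                 "getelementptr",
--             ]:
--                 stats["memory"] += 1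
--
--     return stats
-- ===== SOURCE B (Python) =====
-- _CONTROL_FLOW = ["br", "call", "ret", "switch", "indirectbr", "invoke",
--                  "callbr", "resume", "catchswitch", "catchret",
--                  "cleanupret", "unreachable"]
-- _ARITHMETIC = ["fneg", "add", "fadd", "sub", "fsub", "mul", "fmul",
--                "udiv", "sdiv", "fdiv", "urem", "srem", "frem", "shl",
--                "lshr", "ashr", "and", "or", "xor"]
-- _MEMORY = ["alloca", "load", "store", "fence", "cmpxchg", "atomicrmw",
--            "getelementptr"]
--
--
-- def extract_statistics_from_ir(ir: str):
--     # Pass 1: histogram of the first token of every non-blank line.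
--     counts = {}
--     for line in ir.splitlines():
--         tokens = line.split()
--         if tokens:
--             op = tokens[0]
--             counts[op] = counts.get(op, 0) + 1
--     # Pass 2: aggregate the histogram per category (opcode lists are disjoint).
--     return {
--         "control_flow": sum(counts.get(op, 0) for op in _CONTROL_FLOW),
--         "arithmetic": sum(counts.get(op, 0) for op in _ARITHMETIC),
--         "memory": sum(counts.get(op, 0) for op in _MEMORY),
--     }
-- ===== Notes on version B (the rewrite author's own statement) =====
-- stated objective: alternative
-- what changed: A classifies each line's first token against three literal lists inside the loop; B reverses the aggregation: one pass builds a full histogram of first tokens, then each category is computed afterwards by summing the histogram over that category's opcode list (correct since the lists are disjoint and duplicate-free).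
import Mathlib
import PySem

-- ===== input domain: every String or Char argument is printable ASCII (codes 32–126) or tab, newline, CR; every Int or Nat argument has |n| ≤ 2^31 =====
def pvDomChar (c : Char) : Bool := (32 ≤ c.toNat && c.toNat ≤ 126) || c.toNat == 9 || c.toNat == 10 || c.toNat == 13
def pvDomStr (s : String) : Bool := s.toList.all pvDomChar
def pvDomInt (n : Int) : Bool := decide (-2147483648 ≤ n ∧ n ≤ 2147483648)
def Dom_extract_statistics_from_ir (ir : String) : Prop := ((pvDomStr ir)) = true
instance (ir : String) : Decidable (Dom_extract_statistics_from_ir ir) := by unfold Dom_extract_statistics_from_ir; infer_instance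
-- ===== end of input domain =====

-- B reverses the aggregation: one pass builds a histogram of first tokens, then each
-- category is a sum of histogram entries over its opcode list (alternative; same behaviour).

-- ===== PORT A =====
def pvControlFlow : List String :=
  ["br", "call", "ret", "switch", "indirectbr", "invoke", "callbr", "resume",
   "catchswitch", "catchret", "cleanupret", "unreachable"]

def pvArithmetic : List String :=
  ["fneg", "add", "fadd", "sub", "fsub", "mul", "fmul", "udiv", "sdiv", "fdiv",
   "urem", "srem", "frem", "shl", "lshr", "ashr", "and", "or", "xor"]

def pvMemory : List String :=
  ["alloca", "load", "store", "fence", "cmpxchg", "atomicrmw", "getelementptr"]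

-- A's loop body: tokens = line.split(); branch on the first token's membership.
-- stats[k] += 1 is ported as Dict.modify k 0 (·+1); the three keys are always present.
def pvStepA (stats : PySem.Dict String Int) (line : String) : PySem.Dict String Int :=
  let tokens := PySem.Str.split₀ line
  if tokens.length > 0 then
    let opcode := tokens.headI
    if opcode ∈ pvControlFlow then stats.modify "control_flow" 0 (· + 1)
    else if opcode ∈ pvArithmetic then stats.modify "arithmetic" 0 (· + 1)
    else if opcode ∈ pvMemory then stats.modify "memory" 0 (· + 1)
    else stats
  else stats

def extract_statistics_from_ir (ir : String) : List (String × Int) :=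
  let stats : PySem.Dict String Int :=
    PySem.Dict.ofList [("control_flow", 0), ("arithmetic", 0), ("memory", 0)]
  ((PySem.Str.splitlines ir).foldl pvStepA stats).items

-- ===== PORT B =====
-- pass 1: counts[op] = counts.get(op, 0) + 1 over the first token of each non-blank line
def pvHistStep (counts : PySem.Dict String Int) (line : String) : PySem.Dict String Int :=
  match PySem.Str.split₀ line with
  | [] => counts
  | op :: _ => counts.insert op (counts.getD op 0 + 1)

-- pass 2: sum(counts.get(op, 0) for op in ops)
def pvCatSum (counts : PySem.Dict String Int) (ops : List String) : Int :=
  (ops.map (fun op => counts.getD op 0)).sum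

def extract_statistics_from_ir_alt (ir : String) : List (String × Int) :=
  let counts := (PySem.Str.splitlines ir).foldl pvHistStep PySem.Dict.empty
  [("control_flow", pvCatSum counts pvControlFlow),
   ("arithmetic", pvCatSum counts pvArithmetic),
   ("memory", pvCatSum counts pvMemory)]

-- ===== PRECONDITION & SPEC =====
def Spec_extract_statistics_from_ir (ir : String) (out : List (String × Int)) : Prop := out = extract_statistics_from_ir_alt ir
instance (ir : String) (out : List (String × Int)) : Decidable (Spec_extract_statistics_from_ir ir out) := by unfold Spec_extract_statistics_from_ir; infer_instance

-- ===== CLAIM (what is proved, stated in full; the proofs are below) =====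
def Claim_equal_extract_statistics_from_ir : Prop := ∀ (ir : String), Dom_extract_statistics_from_ir ir → Spec_extract_statistics_from_ir ir (extract_statistics_from_ir ir)

-- ===== LEMMAS AND PROOFS =====

-- the first tokens of the non-blank lines
def pvFtoks (lines : List String) : List String :=
  lines.filterMap (fun l => (PySem.Str.split₀ l).head?)

-- A's per-first-token step
def pvTokA (stats : PySem.Dict String Int) (op : String) : PySem.Dict String Int :=
  if op ∈ pvControlFlow then stats.modify "control_flow" 0 (· + 1)
  else if op ∈ pvArithmetic then stats.modify "arithmetic" 0 (· + 1)
  else if op ∈ pvMemory then stats.modify "memory" 0 (· + 1)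
  else stats

theorem pvFoldA_eq (lines : List String) (d : PySem.Dict String Int) :
    lines.foldl pvStepA d = (pvFtoks lines).foldl pvTokA d := by
  induction lines generalizing d with
  | nil => rfl
  | cons l ls ih =>
    simp only [List.foldl_cons, pvFtoks, List.filterMap_cons]
    cases h : PySem.Str.split₀ l with
    | nil =>
      have : pvStepA d l = d := by simp [pvStepA, h]
      rw [this, ih]; rfl
    | cons op rest =>
      have : pvStepA d l = pvTokA d op := by
        simp [pvStepA, pvTokA, h, List.headI]
      rw [this, ih]; rfl

theorem pvFoldB_eq (lines : List String) (d : PySem.Dict String Int) :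
    lines.foldl pvHistStep d =
      (pvFtoks lines).foldl (fun d x => d.insert x (d.getD x 0 + 1)) d := by
  induction lines generalizing d with
  | nil => rfl
  | cons l ls ih =>
    simp only [List.foldl_cons, pvFtoks, List.filterMap_cons]
    cases h : PySem.Str.split₀ l with
    | nil => rw [show pvHistStep d l = d by simp [pvHistStep, h], ih]; rfl
    | cons op rest =>
      rw [show pvHistStep d l = d.insert op (d.getD op 0 + 1) by simp [pvHistStep, h], ih]
      rfl

-- disjointness of the three opcode lists
theorem pvAR_not_CF (t : String) (h : t ∈ pvArithmetic) : t ∉ pvControlFlow := by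
  fin_cases h <;> decide

theorem pvMEM_not_CF (t : String) (h : t ∈ pvMemory) : t ∉ pvControlFlow := by
  fin_cases h <;> decide

theorem pvMEM_not_AR (t : String) (h : t ∈ pvMemory) : t ∉ pvArithmetic := by
  fin_cases h <;> decide

-- getD of the A-side fold at each of the three keys counts membership in its list
theorem pvTokA_getD (toks : List String) (d : PySem.Dict String Int) (k : String) (ops : List String)
    (hk : (k = "control_flow" ∧ ops = pvControlFlow) ∨ (k = "arithmetic" ∧ ops = pvArithmetic)
        ∨ (k = "memory" ∧ ops = pvMemory)) :
    (toks.foldl pvTokA d).getD k 0 = d.getD k 0 + (toks.countP (fun t => decide (t ∈ ops)) : Int) := by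
  induction toks generalizing d with
  | nil => simp
  | cons op rest ih =>
    simp only [List.foldl_cons, List.countP_cons, ih]
    have step : (pvTokA d op).getD k 0
        = d.getD k 0 + (if decide (op ∈ ops) = true then 1 else 0) := by
      unfold pvTokA
      rcases hk with ⟨hk, ho⟩ | ⟨hk, ho⟩ | ⟨hk, ho⟩ <;> subst hk <;> subst ho
      · by_cases h1 : op ∈ pvControlFlow
        · simp [h1]
        · by_cases h2 : op ∈ pvArithmetic
          · simp [h1, h2, PySem.Dict.getD_modify]
          · by_cases h3 : op ∈ pvMemory
            · simp [h1, h2, h3, PySem.Dict.getD_modify]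
            · simp [h1, h2, h3]
      · by_cases h1 : op ∈ pvControlFlow
        · have hna : op ∉ pvArithmetic := fun h => pvAR_not_CF op h h1
          simp [h1, hna, PySem.Dict.getD_modify]
        · by_cases h2 : op ∈ pvArithmetic
          · simp [h1, h2]
          · by_cases h3 : op ∈ pvMemory
            · simp [h1, h2, h3, PySem.Dict.getD_modify]
            · simp [h1, h2, h3]
      · by_cases h1 : op ∈ pvControlFlow
        · have hnm : op ∉ pvMemory := fun h => pvMEM_not_CF op h h1
          simp [h1, hnm, PySem.Dict.getD_modify]
        · by_cases h2 : op ∈ pvArithmetic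
          · have hnm : op ∉ pvMemory := fun h => pvMEM_not_AR op h h2
            simp [h1, h2, hnm, PySem.Dict.getD_modify]
          · by_cases h3 : op ∈ pvMemory
            · simp [h1, h2, h3]
            · simp [h1, h2, h3]
    rw [step]
    push_cast
    ring

-- pvTokA keeps the key list unchanged when all three keys are present
theorem pvTokA_keys (toks : List String) (d : PySem.Dict String Int)
    (h1 : "control_flow" ∈ d.keys) (h2 : "arithmetic" ∈ d.keys) (h3 : "memory" ∈ d.keys) :
    (toks.foldl pvTokA d).keys = d.keys := by
  induction toks generalizing d with
  | nil => rfl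
  | cons op rest ih =>
    have keyeq : (pvTokA d op).keys = d.keys := by
      unfold pvTokA
      split_ifs <;>
        simp only [PySem.Dict.keys_modify] <;>
        first
        | rfl
        | (exact PySem.Dict.keys_insert_of_contains _ _
            ((PySem.Dict.contains_iff_mem_keys _ _).mpr (by assumption)))
    simp only [List.foldl_cons]
    rw [ih (pvTokA d op) (by rw [keyeq]; exact h1) (by rw [keyeq]; exact h2)
          (by rw [keyeq]; exact h3), keyeq]

-- summing per-opcode counts over a duplicate-free list = counting membership
theorem pvSum_count (ops : List String) (toks : List String) (hnd : ops.Nodup) :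
    ((ops.map (fun op => ((toks.count op : Nat) : Int))).sum)
      = (toks.countP (fun t => decide (t ∈ ops)) : Int) := by
  induction ops with
  | nil => simp
  | cons op rest ih =>
    rcases List.nodup_cons.mp hnd with ⟨hop, hrest⟩
    have split : toks.countP (fun t => decide (t ∈ op :: rest))
        = toks.count op + toks.countP (fun t => decide (t ∈ rest)) := by
      clear ih hnd
      induction toks with
      | nil => simp
      | cons t ts iht =>
        simp only [List.countP_cons, List.count_cons, List.mem_cons] at iht ⊢
        by_cases h1 : t = op <;> by_cases h2 : t ∈ rest
        · exact absurd (h1 ▸ h2) hop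
        · subst h1
          simp only [h2, beq_iff_eq, decide_true, decide_false, true_or, if_true,
            Bool.false_eq_true, if_false]
          omega
        · simp only [h1, h2, beq_iff_eq, decide_true, or_true, if_true,
            if_false]
          omega
        · simp only [h1, h2, beq_iff_eq, decide_false, or_false, if_false]
          omega
    simp only [List.map_cons, List.sum_cons, ih hrest, split]
    push_cast
    ring

-- B's category sum = count of first tokens in that list
theorem pvB_cat (toks : List String) (ops : List String) (hnd : ops.Nodup) :
    pvCatSum (toks.foldl (fun d x => d.insert x (d.getD x 0 + 1)) PySem.Dict.empty) ops
      = (toks.countP (fun t => decide (t ∈ ops)) : Int) := by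
  unfold pvCatSum
  have : ∀ op : String,
      (toks.foldl (fun d x => d.insert x (d.getD x 0 + 1)) PySem.Dict.empty).getD op 0
        = ((toks.count op : Nat) : Int) := by
    intro op
    rw [PySem.Dict.getD_foldl_insert_add_one]
    simp [PySem.Dict.getD_empty]
  simp only [this]
  exact pvSum_count ops toks hnd

-- ===== VERDICT (by name: the statement is the Claim_ definition above) =====
theorem extract_statistics_from_ir_spec : Claim_equal_extract_statistics_from_ir := by
  intro ir _
  unfold Spec_extract_statistics_from_ir extract_statistics_from_ir extract_statistics_from_ir_alt
  show ((PySem.Str.splitlines ir).foldl pvStepA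
      (PySem.Dict.ofList [("control_flow", 0), ("arithmetic", 0), ("memory", 0)])).items
    = [("control_flow",
          pvCatSum ((PySem.Str.splitlines ir).foldl pvHistStep PySem.Dict.empty) pvControlFlow),
       ("arithmetic",
          pvCatSum ((PySem.Str.splitlines ir).foldl pvHistStep PySem.Dict.empty) pvArithmetic),
       ("memory",
          pvCatSum ((PySem.Str.splitlines ir).foldl pvHistStep PySem.Dict.empty) pvMemory)]
  generalize PySem.Str.splitlines ir = lines
  rw [pvFoldA_eq, pvFoldB_eq]
  have hkeys : ((pvFtoks lines).foldl pvTokA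
      (PySem.Dict.ofList [("control_flow", 0), ("arithmetic", 0), ("memory", 0)])).keys
      = ["control_flow", "arithmetic", "memory"] := by
    rw [pvTokA_keys _ _ (by decide) (by decide) (by decide)]; decide
  have hnodup : ((pvFtoks lines).foldl pvTokA
      (PySem.Dict.ofList [("control_flow", 0), ("arithmetic", 0), ("memory", 0)])).keys.Nodup := by
    rw [hkeys]; decide
  rw [PySem.Dict.items_eq_map_keys _ hnodup 0, hkeys]
  have hcf := pvTokA_getD (pvFtoks lines)
    (PySem.Dict.ofList [("control_flow", 0), ("arithmetic", 0), ("memory", 0)])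
    "control_flow" pvControlFlow (Or.inl ⟨rfl, rfl⟩)
  have har := pvTokA_getD (pvFtoks lines)
    (PySem.Dict.ofList [("control_flow", 0), ("arithmetic", 0), ("memory", 0)])
    "arithmetic" pvArithmetic (Or.inr (Or.inl ⟨rfl, rfl⟩))
  have hme := pvTokA_getD (pvFtoks lines)
    (PySem.Dict.ofList [("control_flow", 0), ("arithmetic", 0), ("memory", 0)])
    "memory" pvMemory (Or.inr (Or.inr ⟨rfl, rfl⟩))
  have hbcf := pvB_cat (pvFtoks lines) pvControlFlow (by decide)
  have hbar := pvB_cat (pvFtoks lines) pvArithmetic (by decide)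
  have hbme := pvB_cat (pvFtoks lines) pvMemory (by decide)
  have z1 : (PySem.Dict.ofList [("control_flow", (0:Int)), ("arithmetic", 0), ("memory", 0)]).getD
      "control_flow" 0 = 0 := by decide
  have z2 : (PySem.Dict.ofList [("control_flow", (0:Int)), ("arithmetic", 0), ("memory", 0)]).getD
      "arithmetic" 0 = 0 := by decide
  have z3 : (PySem.Dict.ofList [("control_flow", (0:Int)), ("arithmetic", 0), ("memory", 0)]).getD
      "memory" 0 = 0 := by decide
  simp only [List.map_cons, List.map_nil, hcf, har, hme, hbcf, hbar, hbme, z1, z2, z3, zero_add]
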